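-- pv_equiv track=rewrite | github.com/jihoyeo/seoul-travel-demand-2024 | seoul_zoning_viz/export_parcels.py | pick_zone_class
-- ===== SOURCE A (Python) =====
-- ZONE_CLASS_MAP = {
--     "UQA111": "전용주거", "UQA112": "전용주거",
--     "UQA121": "일반주거_저밀(1종)",
--     "UQA122": "일반주거_중밀(2종)",
--     "UQA123": "일반주거_고밀(3종)",
--     "UQA130": "준주거",
--     "UQA210": "중심·일반상업", "UQA220": "중심·일반상업",
--     "UQA230": "근린·유통상업", "UQA240": "근린·유통상업",
--     "UQA310": "전용공업",
--     "UQA320": "일반·준공업", "UQA330": "일반·준공업",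
--     "UQA410": "보전·자연녹지", "UQA430": "보전·자연녹지",
--     "UQA420": "생산녹지",
--     "UQA510": "관리·농림·자연환경", "UQA520": "관리·농림·자연환경",
--     "UQA530": "관리·농림·자연환경",
--     "UQA610": "관리·농림·자연환경", "UQA710": "관리·농림·자연환경",
-- }
--
-- SPECIFIC_PREFIXES = ("UQA1", "UQA2", "UQA3", "UQA4", "UQA5", "UQA6", "UQA7")
--
-- GENERIC_URBAN = {"UQA01X", "UQA001", "UQA002"}
--
-- def pick_zone_class(a7: str) -> tuple[str, str]:
--     if not a7:
--         return ("", "미지정")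
--     codes = [c.strip() for c in a7.split(",") if c.strip()]
--     for c in codes:
--         if c in ZONE_CLASS_MAP:
--             return (c, ZONE_CLASS_MAP[c])
--     for c in codes:
--         if c.startswith(SPECIFIC_PREFIXES) and len(c) >= 5:
--             d = c[3]
--             if d == "1":
--                 return (c, "일반주거_중밀(2종)" if c[4] == "2" else "일반주거_기타")
--             if d == "2":
--                 return (c, "중심·일반상업")
--             if d == "3":
--                 return (c, "일반·준공업")
--             if d == "4":
--                 return (c, "보전·자연녹지")
--     for c in codes:
--         if c in GENERIC_URBAN:
--             return (c, "도시지역_세부미지정")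
--     return ("", "미지정")
-- ===== SOURCE B (Python) =====
-- ZONE_CLASS_MAP = {
--     "UQA111": "전용주거", "UQA112": "전용주거",
--     "UQA121": "일반주거_저밀(1종)",
--     "UQA122": "일반주거_중밀(2종)",
--     "UQA123": "일반주거_고밀(3종)",
--     "UQA130": "준주거",
--     "UQA210": "중심·일반상업", "UQA220": "중심·일반상업",
--     "UQA230": "근린·유통상업", "UQA240": "근린·유통상업",
--     "UQA310": "전용공업",
--     "UQA320": "일반·준공업", "UQA330": "일반·준공업",
--     "UQA410": "보전·자연녹지", "UQA430": "보전·자연녹지",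
--     "UQA420": "생산녹지",
--     "UQA510": "관리·농림·자연환경", "UQA520": "관리·농림·자연환경",
--     "UQA530": "관리·농림·자연환경",
--     "UQA610": "관리·농림·자연환경", "UQA710": "관리·농림·자연환경",
-- }
--
-- SPECIFIC_PREFIXES = ("UQA1", "UQA2", "UQA3", "UQA4", "UQA5", "UQA6", "UQA7")
--
-- GENERIC_URBAN = {"UQA01X", "UQA001", "UQA002"}
--
--
-- def _zone2_label(c):
--     if len(c) >= 5 and c.startswith(SPECIFIC_PREFIXES):
--         d = c[3]
--         if d == "1":
--             return "일반주거_중밀(2종)" if c[4] == "2" else "일반주거_기타"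
--         if d == "2":
--             return "중심·일반상업"
--         if d == "3":
--             return "일반·준공업"
--         if d == "4":
--             return "보전·자연녹지"
--     return None
--
--
-- def _classify(c):
--     """Lowest applicable priority tier of a code, with its label; None if no tier applies."""
--     if c in ZONE_CLASS_MAP:
--         return (1, (c, ZONE_CLASS_MAP[c]))
--     lab = _zone2_label(c)
--     if lab is not None:
--         return (2, (c, lab))
--     if c in GENERIC_URBAN:
--         return (3, (c, "도시지역_세부미지정"))
--     return None
--
--
-- def pick_zone_class(a7: str) -> tuple[str, str]:
--     if not a7:
--         return ("", "미지정")
--     best = None  # (tier, (code, label)); first code of the globally minimal tier wins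
--     for raw in a7.split(","):
--         c = raw.strip()
--         if not c:
--             continue
--         e = _classify(c)
--         if e is not None and (best is None or e[0] < best[0]):
--             best = e
--     return best[1] if best is not None else ("", "미지정")
-- ===== Notes on version B (the rewrite author's own statement) =====
-- stated objective: alternative
-- what changed: Replaces A's three sequential scans over the code list (exact map, prefix rule, generic set) by a single forward pass that computes each code's lowest applicable priority tier once and keeps the first code of the globally minimal tier (strict-< update).
import Mathlib
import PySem

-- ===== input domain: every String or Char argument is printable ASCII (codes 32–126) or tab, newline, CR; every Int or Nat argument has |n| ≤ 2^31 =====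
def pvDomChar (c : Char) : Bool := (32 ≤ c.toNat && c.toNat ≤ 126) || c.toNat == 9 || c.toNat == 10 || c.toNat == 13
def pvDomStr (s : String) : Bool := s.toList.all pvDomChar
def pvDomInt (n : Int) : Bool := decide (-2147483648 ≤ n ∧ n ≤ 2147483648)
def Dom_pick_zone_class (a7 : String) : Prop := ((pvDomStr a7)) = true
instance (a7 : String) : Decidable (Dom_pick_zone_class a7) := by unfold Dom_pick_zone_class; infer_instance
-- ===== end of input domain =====

-- B replaces A's three sequential scans of the code list by one forward pass keeping the
-- best (lowest-tier) match found so far; same results, alternative structure (not claimed faster).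

-- shared module-level constants
def pvZoneMap : PySem.Dict String String := PySem.Dict.ofList [
  ("UQA111", "전용주거"), ("UQA112", "전용주거"),
  ("UQA121", "일반주거_저밀(1종)"),
  ("UQA122", "일반주거_중밀(2종)"),
  ("UQA123", "일반주거_고밀(3종)"),
  ("UQA130", "준주거"),
  ("UQA210", "중심·일반상업"), ("UQA220", "중심·일반상업"),
  ("UQA230", "근린·유통상업"), ("UQA240", "근린·유통상업"),
  ("UQA310", "전용공업"),
  ("UQA320", "일반·준공업"), ("UQA330", "일반·준공업"),
  ("UQA410", "보전·자연녹지"), ("UQA430", "보전·자연녹지"),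
  ("UQA420", "생산녹지"),
  ("UQA510", "관리·농림·자연환경"), ("UQA520", "관리·농림·자연환경"),
  ("UQA530", "관리·농림·자연환경"),
  ("UQA610", "관리·농림·자연환경"), ("UQA710", "관리·농림·자연환경")]

def pvPrefixes : List String := ["UQA1", "UQA2", "UQA3", "UQA4", "UQA5", "UQA6", "UQA7"]

def pvGenericUrban : List String := ["UQA01X", "UQA001", "UQA002"]  -- python set, distinct literals

-- ===== PORT A =====
-- loop 1: for c in codes: if c in ZONE_CLASS_MAP: return (c, ZONE_CLASS_MAP[c])
def pvLoopA1 : List String → Option (String × String)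
  | [] => none
  | c :: cs =>
    if pvZoneMap.contains c then some (c, pvZoneMap.getD c "") else pvLoopA1 cs

-- loop 2: the SPECIFIC_PREFIXES / len>=5 / c[3] branch (c[3], c[4] via pyGet?; exact, guarded by len>=5)
def pvLoopA2 : List String → Option (String × String)
  | [] => none
  | c :: cs =>
    if pvPrefixes.any (fun p => PySem.Str.startswith c p) && decide (5 ≤ PySem.Str.len c) then
      match PySem.Str.pyGet? c 3 with
      | some d =>
        if d = '1' then
          some (c, if PySem.Str.pyGet? c 4 = some '2' then "일반주거_중밀(2종)" else "일반주거_기타")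
        else if d = '2' then some (c, "중심·일반상업")
        else if d = '3' then some (c, "일반·준공업")
        else if d = '4' then some (c, "보전·자연녹지")
        else pvLoopA2 cs
      | none => pvLoopA2 cs   -- unreachable: len c >= 5
    else pvLoopA2 cs

-- loop 3: for c in codes: if c in GENERIC_URBAN: return (c, "도시지역_세부미지정")
def pvLoopA3 : List String → Option (String × String)
  | [] => none
  | c :: cs =>
    if pvGenericUrban.contains c then some (c, "도시지역_세부미지정") else pvLoopA3 cs

def pick_zone_class (a7 : String) : String × String :=
  if a7 = "" then ("", "미지정")
  else
    -- codes = [c.strip() for c in a7.split(",") if c.strip()]  (sep "," ≠ "", so split? is some)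
    let codes := (((PySem.Str.split? a7 ",").getD []).filter
        (fun c => PySem.Str.strip c ≠ "")).map PySem.Str.strip
    match pvLoopA1 codes with
    | some r => r
    | none =>
      match pvLoopA2 codes with
      | some r => r
      | none =>
        match pvLoopA3 codes with
        | some r => r
        | none => ("", "미지정")

-- ===== PORT B =====
-- _zone2_label(c)
def pvZone2Label (c : String) : Option String :=
  if decide (5 ≤ PySem.Str.len c) && pvPrefixes.any (fun p => PySem.Str.startswith c p) then
    match PySem.Str.pyGet? c 3 with
    | some d =>
      if d = '1' then
        some (if PySem.Str.pyGet? c 4 = some '2' then "일반주거_중밀(2종)" else "일반주거_기타")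
      else if d = '2' then some "중심·일반상업"
      else if d = '3' then some "일반·준공업"
      else if d = '4' then some "보전·자연녹지"
      else none
    | none => none   -- unreachable: len c >= 5
  else none

-- _classify(c): lowest applicable tier with its (code, label); none if no tier applies
def pvClassify (c : String) : Option (Nat × (String × String)) :=
  if pvZoneMap.contains c then some (1, (c, pvZoneMap.getD c ""))
  else
    match pvZone2Label c with
    | some lab => some (2, (c, lab))
    | none =>
      if pvGenericUrban.contains c then some (3, (c, "도시지역_세부미지정")) else none

-- one iteration of B's single loop
def pvStepB (b : Option (Nat × (String × String))) (raw : String) :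
    Option (Nat × (String × String)) :=
  let c := PySem.Str.strip raw
  if c = "" then b
  else
    match pvClassify c with
    | none => b
    | some e =>
      match b with
      | none => some e
      | some bb => if e.1 < bb.1 then some e else some bb

def pick_zone_class_alt (a7 : String) : String × String :=
  if a7 = "" then ("", "미지정")
  else
    match ((PySem.Str.split? a7 ",").getD []).foldl pvStepB none with
    | some e => e.2
    | none => ("", "미지정")

-- ===== PRECONDITION & SPEC =====
def Spec_pick_zone_class (a7 : String) (out : String × String) : Prop := out = pick_zone_class_alt a7
instance (a7 : String) (out : String × String) : Decidable (Spec_pick_zone_class a7 out) := by unfold Spec_pick_zone_class; infer_instance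

-- ===== CLAIM (what is proved, stated in full; the proofs are below) =====
def Claim_equal_pick_zone_class : Prop := ∀ (a7 : String), Dom_pick_zone_class a7 → Spec_pick_zone_class a7 (pick_zone_class a7)

-- ===== LEMMAS AND PROOFS =====

-- left-biased minimum-by-tier combination; pvStepB is "merge with the classification of the code"
def pvMerge (b e : Option (Nat × (String × String))) : Option (Nat × (String × String)) :=
  match e with
  | none => b
  | some ee =>
    match b with
    | none => some ee
    | some bb => if ee.1 < bb.1 then some ee else some bb

lemma pvStepB_eq_merge (b : Option (Nat × (String × String))) (raw : String) :
    pvStepB b raw =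
      pvMerge b (if PySem.Str.strip raw = "" then none else pvClassify (PySem.Str.strip raw)) := by
  by_cases h : PySem.Str.strip raw = "" <;> simp only [pvStepB, h, if_true, if_false] <;>
    [skip; rcases pvClassify (PySem.Str.strip raw) with _ | e] <;> rfl

lemma pvMerge_none_left (e : Option (Nat × (String × String))) : pvMerge none e = e := by
  rcases e with _ | e <;> rfl

lemma pvMerge_assoc (a b c : Option (Nat × (String × String))) :
    pvMerge (pvMerge a b) c = pvMerge a (pvMerge b c) := by
  rcases a with _ | a
  · rw [pvMerge_none_left, pvMerge_none_left]
  · rcases b with _ | b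
    · show pvMerge (some a) c = pvMerge (some a) (pvMerge none c)
      rw [pvMerge_none_left]
    · rcases c with _ | c
      · rfl
      · by_cases h1 : b.1 < a.1 <;> by_cases h2 : c.1 < b.1 <;> by_cases h3 : c.1 < a.1 <;>
          simp [pvMerge, h1, h2, h3] <;> omega

def pvStepC (b : Option (Nat × (String × String))) (c : String) :
    Option (Nat × (String × String)) := pvMerge b (pvClassify c)

lemma pvFoldC_merge (cs : List String) (b : Option (Nat × (String × String))) :
    cs.foldl pvStepC b = pvMerge b (cs.foldl pvStepC none) := by
  induction cs generalizing b with
  | nil => cases b <;> rfl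
  | cons c cs ih =>
    simp only [List.foldl_cons]
    rw [ih, ih (pvStepC none c)]
    show pvMerge (pvMerge b (pvClassify c)) _ = pvMerge b (pvMerge (pvMerge none (pvClassify c)) _)
    rw [pvMerge_assoc]
    rcases pvClassify c with _ | e <;> rfl

-- B's fold over the raw split pieces equals the fold of pvStepC over A's code list
lemma pvFoldB_eq_foldC (cs : List String) (b : Option (Nat × (String × String))) :
    cs.foldl pvStepB b =
      ((cs.filter (fun c => PySem.Str.strip c ≠ "")).map PySem.Str.strip).foldl pvStepC b := by
  induction cs generalizing b with
  | nil => rfl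
  | cons c cs ih =>
    by_cases h : PySem.Str.strip c = ""
    · simp [h, pvStepB, ih]
    · simp [h, ih, pvStepB_eq_merge, pvStepC]

-- characterizations of A's three loops by find?
lemma pvLoopA1_eq (cs : List String) :
    pvLoopA1 cs = (cs.find? (fun c => pvZoneMap.contains c)).map
      (fun c => (c, pvZoneMap.getD c "")) := by
  induction cs with
  | nil => rfl
  | cons c cs ih =>
    by_cases h : pvZoneMap.contains c = true
    · rw [pvLoopA1, if_pos h, List.find?_cons_of_pos h]; rfl
    · rw [pvLoopA1, if_neg h, List.find?_cons_of_neg h, ih]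

lemma pvLoopA2_step (c : String) (cs : List String) :
    pvLoopA2 (c :: cs) =
      match pvZone2Label c with
      | some lab => some (c, lab)
      | none => pvLoopA2 cs := by
  rw [pvLoopA2, pvZone2Label, Bool.and_comm]
  rcases hC : (decide (5 ≤ PySem.Str.len c) && pvPrefixes.any (fun p => PySem.Str.startswith c p))
  · simp only [Bool.false_eq_true, if_false]
  · simp only [if_true]
    rcases hg : PySem.Str.pyGet? c 3 with _ | d
    · rfl
    · by_cases h1 : d = '1'
      · subst h1; simp
      · by_cases h2 : d = '2'
        · subst h2; simp
        · by_cases h3 : d = '3'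
          · subst h3; simp
          · by_cases h4 : d = '4'
            · subst h4; simp
            · simp [h1, h2, h3, h4]

lemma pvLoopA2_eq (cs : List String) :
    pvLoopA2 cs = (cs.find? (fun c => (pvZone2Label c).isSome)).map
      (fun c => (c, (pvZone2Label c).getD "")) := by
  induction cs with
  | nil => rfl
  | cons c cs ih =>
    rw [pvLoopA2_step]
    rcases h : pvZone2Label c with _ | lab
    · rw [List.find?_cons_of_neg (by simp [h]), ih]
    · rw [List.find?_cons_of_pos (by simp [h])]
      simp [h]

lemma pvLoopA3_eq (cs : List String) :
    pvLoopA3 cs = (cs.find? (fun c => pvGenericUrban.contains c)).map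
      (fun c => (c, "도시지역_세부미지정")) := by
  induction cs with
  | nil => rfl
  | cons c cs ih =>
    by_cases h : pvGenericUrban.contains c = true
    · rw [pvLoopA3, if_pos h, List.find?_cons_of_pos h]; rfl
    · rw [pvLoopA3, if_neg h, List.find?_cons_of_neg h, ih]

-- the main characterization: B's single pass computes A's three-loop cascade
lemma pvFoldC_char (cs : List String) :
    cs.foldl pvStepC none =
      match cs.find? (fun c => pvZoneMap.contains c) with
      | some c => some (1, (c, pvZoneMap.getD c ""))
      | none =>
        match cs.find? (fun c => (pvZone2Label c).isSome) with
        | some c => some (2, (c, (pvZone2Label c).getD ""))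
        | none =>
          match cs.find? (fun c => pvGenericUrban.contains c) with
          | some c => some (3, (c, "도시지역_세부미지정"))
          | none => none := by
  induction cs with
  | nil => rfl
  | cons c cs ih =>
    rw [List.foldl_cons, pvFoldC_merge, ih]
    show pvMerge (pvMerge none (pvClassify c)) _ = _
    rw [pvMerge_none_left]
    by_cases h1 : pvZoneMap.contains c = true
    · rw [List.find?_cons_of_pos h1, pvClassify, if_pos h1]
      rcases cs.find? (fun c => pvZoneMap.contains c) with _ | c1 <;>
        rcases cs.find? (fun c => (pvZone2Label c).isSome) with _ | c2 <;>
        rcases cs.find? (fun c => pvGenericUrban.contains c) with _ | c3 <;> rfl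
    · rw [List.find?_cons_of_neg h1, pvClassify, if_neg h1]
      rcases hl : pvZone2Label c with _ | lab
      · rw [List.find?_cons_of_neg (by simp [hl])]
        dsimp only
        by_cases h3 : pvGenericUrban.contains c = true
        · rw [List.find?_cons_of_pos h3, if_pos h3]
          rcases cs.find? (fun c => pvZoneMap.contains c) with _ | c1 <;>
            rcases cs.find? (fun c => (pvZone2Label c).isSome) with _ | c2 <;>
            rcases cs.find? (fun c => pvGenericUrban.contains c) with _ | c3 <;> rfl
        · rw [List.find?_cons_of_neg h3, if_neg h3, pvMerge_none_left]
      · rw [List.find?_cons_of_pos (by simp [hl])]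
        simp only [hl, Option.getD_some]
        rcases cs.find? (fun c => pvZoneMap.contains c) with _ | c1 <;>
          rcases cs.find? (fun c => (pvZone2Label c).isSome) with _ | c2 <;>
          rcases cs.find? (fun c => pvGenericUrban.contains c) with _ | c3 <;> rfl

-- ===== VERDICT (by name: the statement is the Claim_ definition above) =====
theorem pick_zone_class_spec : Claim_equal_pick_zone_class := by
  intro a7 _
  unfold Spec_pick_zone_class pick_zone_class pick_zone_class_alt
  by_cases h : a7 = ""
  · simp [h]
  · simp only [h, if_false]
    rw [pvFoldB_eq_foldC, pvFoldC_char, pvLoopA1_eq, pvLoopA2_eq, pvLoopA3_eq]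
    rcases h1 : List.find? (fun c => pvZoneMap.contains c) _ with _ | c1 <;>
      rcases h2 : List.find? (fun c => (pvZone2Label c).isSome) _ with _ | c2 <;>
      rcases h3 : List.find? (fun c => pvGenericUrban.contains c) _ with _ | c3 <;> rfl
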